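-- pv_equiv track=rewrite | github.com/StarsExpress/LeetCode-Repository | greedy/max_profits.py | find_max_profits
-- ===== SOURCE A (Python) =====
-- def _binary_search(job: int, sorted_jobs: list[int], size: int):
--     if size == 0:
--         return 0
--
--     back_idx, front_idx = 0, size - 1
--     while back_idx <= front_idx:
--         mid_idx = (back_idx + front_idx) // 2
--         if sorted_jobs[mid_idx] <= job:
--             back_idx = mid_idx + 1
--             continue
--         front_idx = mid_idx - 1
--
--     return back_idx  # Number of jobs <= target job, implying insertion idx.
--
-- def find_max_profits(difficulty: list[int], profit: list[int], worker: list[int]) -> int:  # LeetCode Q.826.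
--     total_jobs, sorted_jobs, profits = 0, [], []
--     for job_difficulty, job_profit in zip(difficulty, profit):
--         insertion_idx = _binary_search(job_difficulty, sorted_jobs, total_jobs)
--         sorted_jobs.insert(insertion_idx, job_difficulty)
--         profits.insert(insertion_idx, job_profit)
--         total_jobs += 1
--
--     # Turn profits array into array of each max of prefix profits subarray[:ith idx].
--     for idx, profit in enumerate(profits):
--         if idx > 0 and profits[idx - 1] > profit:  # Adjustment starts from 2nd profit.
--             profits[idx] = profits[idx - 1]
--
--     max_profits = 0
--     for ability in worker:
--         insertion_idx = _binary_search(ability, sorted_jobs, total_jobs)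
--         if insertion_idx > 0:
--             max_profits += profits[insertion_idx - 1]
--
--     return max_profits
-- ===== SOURCE B (Python) =====
-- def find_max_profits(difficulty: list[int], profit: list[int], worker: list[int]) -> int:  # LeetCode Q.826.
--     total = 0
--     for ability in worker:
--         best = None
--         for job_difficulty, job_profit in zip(difficulty, profit):
--             if job_difficulty <= ability and (best is None or job_profit > best):
--                 best = job_profit
--         if best is not None:
--             total += best
--     return total
-- ===== Notes on version B (the rewrite author's own statement) =====
-- stated objective: simpler
-- what changed: Replaced the incremental binary-insertion sort, in-place prefix-max pass and per-worker binary search by a direct two-loop scan that, for each worker, takes the best profit among doable jobs straight off the unsorted job list.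
import Mathlib
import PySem

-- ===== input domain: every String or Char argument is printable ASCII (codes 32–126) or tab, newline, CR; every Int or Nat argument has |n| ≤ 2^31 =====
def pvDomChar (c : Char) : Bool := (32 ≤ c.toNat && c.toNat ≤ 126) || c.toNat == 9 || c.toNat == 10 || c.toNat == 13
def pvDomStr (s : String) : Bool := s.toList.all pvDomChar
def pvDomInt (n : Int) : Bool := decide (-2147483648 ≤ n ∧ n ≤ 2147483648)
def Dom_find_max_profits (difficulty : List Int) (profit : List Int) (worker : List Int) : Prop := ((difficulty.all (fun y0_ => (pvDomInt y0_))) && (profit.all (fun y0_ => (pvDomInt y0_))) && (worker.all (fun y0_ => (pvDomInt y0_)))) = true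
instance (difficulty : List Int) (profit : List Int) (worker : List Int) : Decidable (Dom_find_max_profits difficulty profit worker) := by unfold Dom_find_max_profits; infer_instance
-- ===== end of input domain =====

-- B replaces A's insertion-sort / prefix-max / per-worker binary-search pipeline by a direct
-- per-worker scan of the unsorted job list (objective: simpler; same return value, no speed claim).

-- ===== PORT A =====
-- A's `while back_idx <= front_idx` loop of `_binary_search`; sorted_jobs[mid_idx] is ported with
-- pyGetD (every call keeps 0 ≤ back ∧ front < len(sorted_jobs), so the index is always in range
-- and the default is never used).
def pvBsLoop (job : Int) (sortedJobs : List Int) (back front : Int) : Int :=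
  if h : back ≤ front then
    let mid := PySem.Int.floordiv (back + front) 2
    if PySem.List.pyGetD sortedJobs mid 0 ≤ job then pvBsLoop job sortedJobs (mid + 1) front
    else pvBsLoop job sortedJobs back (mid - 1)
  else back
termination_by (front - back + 1).toNat
decreasing_by
  · have := PySem.Int.floordiv_two_mid_bounds (lo := back) (hi := front) h
    omega
  · have := PySem.Int.floordiv_two_mid_bounds (lo := back) (hi := front) h
    omega
def pvBinarySearch (job : Int) (sortedJobs : List Int) (size : Int) : Int :=
  if size = 0 then 0 else pvBsLoop job sortedJobs 0 (size - 1)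
def find_max_profits (difficulty : List Int) (profit : List Int) (worker : List Int) : Int :=
  -- first loop: state (total_jobs, sorted_jobs, profits)
  let st := (difficulty.zip profit).foldl
    (fun (s : Int × List Int × List Int) jdp =>
      let idx := pvBinarySearch jdp.1 s.2.1 s.1
      (s.1 + 1, PySem.List.insert s.2.1 idx jdp.1, PySem.List.insert s.2.2 idx jdp.2))
    (0, [], [])
  let totalJobs := st.1
  let sortedJobs := st.2.1
  let profits1 := st.2.2
  -- second loop: `for idx, profit in enumerate(profits)` mutates profits in place; the enumerate
  -- value at idx is the still-unmodified live profits[idx], so the loop is a fold over the indices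
  -- range(len(profits)) (the length never changes).
  let profits2 := (List.range profits1.length).foldl
    (fun ps idx =>
      if 0 < idx ∧ ps.getD (idx - 1) 0 > ps.getD idx 0 then ps.set idx (ps.getD (idx - 1) 0) else ps)
    profits1
  -- third loop, over worker
  worker.foldl
    (fun acc ability =>
      let idx := pvBinarySearch ability sortedJobs totalJobs
      if 0 < idx then acc + PySem.List.pyGetD profits2 (idx - 1) 0 else acc)
    0

-- ===== PORT B =====
-- inner loop of Source B: running best (none = `best is None`, no doable job seen yet)
def pvBestFor (pairs : List (Int × Int)) (ability : Int) : Option Int :=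
  pairs.foldl
    (fun best jdp =>
      if decide (jdp.1 ≤ ability) && best.all (fun b => decide (jdp.2 > b)) then some jdp.2
      else best)
    none

def find_max_profits_alt (difficulty : List Int) (profit : List Int) (worker : List Int) : Int :=
  worker.foldl
    (fun total ability =>
      match pvBestFor (difficulty.zip profit) ability with
      | some b => total + b
      | none => total)
    0

-- ===== PRECONDITION & SPEC =====
def Spec_find_max_profits (difficulty : List Int) (profit : List Int) (worker : List Int) (out : Int) : Prop := out = find_max_profits_alt difficulty profit worker
instance (difficulty : List Int) (profit : List Int) (worker : List Int) (out : Int) : Decidable (Spec_find_max_profits difficulty profit worker out) := by unfold Spec_find_max_profits; infer_instance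

-- ===== CLAIM (what is proved, stated in full; the proofs are below) =====
def Claim_equal_find_max_profits : Prop := ∀ (difficulty : List Int) (profit : List Int) (worker : List Int), Dom_find_max_profits difficulty profit worker → Spec_find_max_profits difficulty profit worker (find_max_profits difficulty profit worker)

-- ===== LEMMAS AND PROOFS =====

def pvOmax (l : List Int) : Option Int :=
  l.foldl (fun o x => some (match o with | none => x | some b => max b x)) none

def pvPmax (l : List Int) : Nat → Int
  | 0 => l.getD 0 0
  | i + 1 => max (pvPmax l i) (l.getD (i + 1) 0)

theorem pvBestFor_aux (w : Int) : ∀ (pairs : List (Int × Int)) (acc : Option Int),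
    pairs.foldl (fun best jdp => if decide (jdp.1 ≤ w) && best.all (fun b => decide (jdp.2 > b)) then some jdp.2 else best) acc
      = ((pairs.filter (fun q => decide (q.1 ≤ w))).map Prod.snd).foldl (fun o x => some (match o with | none => x | some b => max b x)) acc
  | [], acc => rfl
  | jdp :: rest, acc => by
    rw [List.foldl_cons, List.filter_cons]
    by_cases h : jdp.1 ≤ w
    · have hstep : (if decide (jdp.1 ≤ w) && acc.all (fun b => decide (jdp.2 > b)) then some jdp.2 else acc)
          = some (match acc with | none => jdp.2 | some b => max b jdp.2) := by
        cases acc with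
        | none => simp [h]
        | some b =>
          by_cases hb : jdp.2 ≤ b
          · rw [if_neg (by simp; omega)]; simp [max_eq_left hb]
          · rw [if_pos (by simp [h]; omega)]; simp [max_eq_right (show b ≤ jdp.2 by omega)]
      rw [hstep, pvBestFor_aux w rest]
      simp only [h, decide_true, if_true, List.map_cons, List.foldl_cons]
    · rw [pvBestFor_aux w rest]
      simp [h]

theorem pvBestFor_eq (pairs : List (Int × Int)) (w : Int) :
    pvBestFor pairs w = pvOmax ((pairs.filter (fun q => decide (q.1 ≤ w))).map Prod.snd) :=
  pvBestFor_aux w pairs none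

theorem pvOmax_perm {l₁ l₂ : List Int} (h : l₁.Perm l₂) : pvOmax l₁ = pvOmax l₂ := by
  unfold pvOmax
  exact @List.Perm.foldl_eq _ _ _ _ _ ⟨by
    intro b a₁ a₂
    cases b <;> simp <;> omega⟩ h none

theorem pvOmax_take (pf : List Int) : ∀ (k : Nat), 0 < k → k ≤ pf.length →
    pvOmax (pf.take k) = some (pvPmax pf (k - 1))
  | 0, h0, _ => absurd h0 (by omega)
  | 1, _, hk => by
    have : pf.take 1 = [pf.getD 0 0] := by
      cases pf with
      | nil => simp at hk
      | cons a t => simp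
    simp [this, pvOmax, pvPmax]
  | (k + 2), _, hk => by
    have ih := pvOmax_take pf (k + 1) (by omega) (by omega)
    have hlt : k + 1 < pf.length := by omega
    have ht : pf.take (k + 2) = pf.take (k + 1) ++ [pf[k+1]] := by
      rw [List.take_add_one]
      simp [List.getElem?_eq_getElem hlt]
    rw [ht]
    unfold pvOmax at *
    rw [List.foldl_append, ih]
    simp [pvPmax, List.getElem?_eq_getElem hlt]

theorem pvSortedSplit (d : Int) : ∀ (xs : List Int), xs.Pairwise (· ≤ ·) →
    (∀ y ∈ xs.dropWhile (fun a => decide (a ≤ d)), d < y) ∧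
      xs.countP (fun a => decide (a ≤ d)) = (xs.takeWhile (fun a => decide (a ≤ d))).length
  | [], _ => by simp
  | x :: xs, h => by
    rw [List.pairwise_cons] at h
    obtain ⟨hx, hxs⟩ := h
    have ih := pvSortedSplit d xs hxs
    by_cases hxd : x ≤ d
    · rw [List.takeWhile_cons_of_pos (by simpa using hxd), List.dropWhile_cons_of_pos (by simpa using hxd),
        List.countP_cons_of_pos (by simpa using hxd)]
      exact ⟨ih.1, by simp [ih.2]⟩
    · rw [List.takeWhile_cons_of_neg (by simpa using hxd), List.dropWhile_cons_of_neg (by simpa using hxd)]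
      constructor
      · intro y hy
        rcases List.mem_cons.mp hy with rfl | hy
        · omega
        · have := hx y hy; omega
      · rw [List.countP_cons_of_neg (by simpa using hxd)]
        simp only [List.length_nil]
        rw [List.countP_eq_zero]
        intro a ha
        have := hx a ha
        simp; omega

theorem pvCountP_of_partition (xs : List Int) (job : Int) (k : Nat) (hk : k ≤ xs.length)
    (h1 : ∀ i : Nat, i < k → xs.getD i 0 ≤ job)
    (h2 : ∀ i : Nat, k ≤ i → i < xs.length → job < xs.getD i 0) :
    xs.countP (fun a => decide (a ≤ job)) = k := by
  conv_lhs => rw [← List.take_append_drop k xs]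
  rw [List.countP_append]
  have ht : (xs.take k).countP (fun a => decide (a ≤ job)) = (xs.take k).length := by
    rw [List.countP_eq_length]
    intro a ha
    rw [List.mem_iff_getElem] at ha
    obtain ⟨i, hi, rfl⟩ := ha
    rw [List.getElem_take]
    have hik : i < k := by simp at hi; omega
    have := h1 i hik
    rw [List.getD_eq_getElem _ _ (by simp at hi ⊢; omega)] at this
    simpa using this
  have hd : (xs.drop k).countP (fun a => decide (a ≤ job)) = 0 := by
    rw [List.countP_eq_zero]
    intro a ha
    rw [List.mem_iff_getElem] at ha
    obtain ⟨i, hi, rfl⟩ := ha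
    rw [List.getElem_drop]
    have hlen : k + i < xs.length := by simp at hi; omega
    have := h2 (k + i) (by omega) hlen
    rw [List.getD_eq_getElem _ _ hlen] at this
    simp; omega
  rw [ht, hd, List.length_take]
  omega

theorem pvBsLoop_spec (job : Int) (xs : List Int) (hs : xs.Pairwise (· ≤ ·)) :
    ∀ n (back front : Int), (front - back + 1).toNat ≤ n →
      0 ≤ back → back ≤ front + 1 → front < (xs.length : Int) →
      (∀ i : Nat, (i : Int) < back → xs.getD i 0 ≤ job) →
      (∀ i : Nat, front < (i : Int) → i < xs.length → job < xs.getD i 0) →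
      pvBsLoop job xs back front = (xs.countP (fun a => decide (a ≤ job)) : Int) := by
  have mono : ∀ i j : Nat, i ≤ j → j < xs.length → xs.getD i 0 ≤ xs.getD j 0 := by
    intro i j hij hj
    rcases Nat.lt_or_ge i j with h | h
    · have := List.pairwise_iff_getElem.mp hs i j (by omega) hj h
      rw [List.getD_eq_getElem _ _ (by omega), List.getD_eq_getElem _ _ hj]
      exact this
    · have : i = j := by omega
      subst this; rfl
  intro n
  induction n with
  | zero =>
    intro back front hm h0 hbf hfl h1 h2
    have hterm : ¬ back ≤ front := by omega
    rw [pvBsLoop, dif_neg hterm]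
    have hk : back = ((back.toNat : Nat) : Int) := by omega
    rw [pvCountP_of_partition xs job back.toNat (by omega)
      (fun i hi => h1 i (by omega)) (fun i hi hil => h2 i (by omega) hil)]
    omega
  | succ n ih =>
    intro back front hm h0 hbf hfl h1 h2
    by_cases hterm : back ≤ front
    · rw [pvBsLoop, dif_pos hterm]
      have hmid := PySem.Int.floordiv_two_mid_bounds (lo := back) (hi := front) hterm
      set mid := PySem.Int.floordiv (back + front) 2 with hmiddef
      have hmid0 : 0 ≤ mid := by omega
      have hmidl : mid < (xs.length : Int) := by omega
      have hget : PySem.List.pyGetD xs mid 0 = xs.getD mid.toNat 0 := by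
        rw [PySem.List.pyGetD_of_nonneg xs 0 hmid0]
      by_cases hc : PySem.List.pyGetD xs mid 0 ≤ job
      · rw [if_pos hc]
        apply ih (mid + 1) front (by omega) (by omega) (by omega) hfl
        · intro i hi
          rcases Nat.lt_or_ge i mid.toNat with h | h
          · rcases Int.lt_or_le (i : Int) back with h' | h'
            · exact h1 i h'
            · calc xs.getD i 0 ≤ xs.getD mid.toNat 0 := mono i mid.toNat (by omega) (by omega)
                _ ≤ job := by rw [← hget]; exact hc
          · have : i = mid.toNat := by omega
            subst this
            rw [← hget]; exact hc
        · exact h2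
      · rw [if_neg hc]
        push Not at hc
        rw [hget] at hc
        apply ih back (mid - 1) (by omega) h0 (by omega) (by omega) h1
        intro i hi hil
        calc job < xs.getD mid.toNat 0 := hc
          _ ≤ xs.getD i 0 := mono mid.toNat i (by omega) hil
    · rw [pvBsLoop, dif_neg hterm]
      rw [pvCountP_of_partition xs job back.toNat (by omega)
        (fun i hi => h1 i (by omega)) (fun i hi hil => h2 i (by omega) hil)]
      omega

theorem pvBinarySearch_spec (job : Int) (xs : List Int) (hs : xs.Pairwise (· ≤ ·)) :
    pvBinarySearch job xs (xs.length : Int) = (xs.countP (fun a => decide (a ≤ job)) : Int) := by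
  unfold pvBinarySearch
  cases xs with
  | nil => simp
  | cons a t =>
    rw [if_neg (by simp; omega)]
    exact pvBsLoop_spec job (a :: t) hs (a :: t).length 0 (((a :: t).length : Int) - 1) (by simp) (by omega)
      (by omega) (by omega) (fun i hi => absurd hi (by omega))
      (fun i hi hil => absurd hi (by push Not; omega))

theorem pvInsertLoop_inv (L : List (Int × Int)) :
    let st := L.foldl
      (fun (s : Int × List Int × List Int) jdp =>
        let idx := pvBinarySearch jdp.1 s.2.1 s.1
        (s.1 + 1, PySem.List.insert s.2.1 idx jdp.1, PySem.List.insert s.2.2 idx jdp.2))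
      (0, [], [])
    st.1 = (st.2.1.length : Int) ∧ st.2.1.length = st.2.2.length ∧
      st.2.1.Pairwise (· ≤ ·) ∧ (st.2.1.zip st.2.2).Perm L := by
  induction L using List.reverseRecOn with
  | nil => simp
  | append_singleton l x ih =>
    simp only [List.foldl_append, List.foldl_cons, List.foldl_nil] at *
    set st := l.foldl
      (fun (s : Int × List Int × List Int) jdp =>
        let idx := pvBinarySearch jdp.1 s.2.1 s.1
        (s.1 + 1, PySem.List.insert s.2.1 idx jdp.1, PySem.List.insert s.2.2 idx jdp.2))
      ((0 : Int), ([] : List Int), ([] : List Int)) with hst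
    obtain ⟨hlen, hll, hsort, hperm⟩ := ih
    set sj := st.2.1
    set pf := st.2.2
    -- the computed insertion index is countP
    have hidx : pvBinarySearch x.1 sj st.1 = (sj.countP (fun a => decide (a ≤ x.1)) : Int) := by
      rw [hlen]; exact pvBinarySearch_spec x.1 sj hsort
    set k := sj.countP (fun a => decide (a ≤ x.1)) with hkdef
    have hkle : k ≤ sj.length := List.countP_le_length
    have hklepf : k ≤ pf.length := by omega
    have split := pvSortedSplit x.1 sj hsort
    have htake : sj.take k = sj.takeWhile (fun a => decide (a ≤ x.1)) := by
      conv_lhs => rw [← List.takeWhile_append_dropWhile (p := fun a => decide (a ≤ x.1)) (l := sj)]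
      rw [hkdef, split.2, List.take_left]
    have hdrop : sj.drop k = sj.dropWhile (fun a => decide (a ≤ x.1)) := by
      conv_lhs => rw [← List.takeWhile_append_dropWhile (p := fun a => decide (a ≤ x.1)) (l := sj)]
      rw [hkdef, split.2, List.drop_left]
    have hins1 : PySem.List.insert sj (pvBinarySearch x.1 sj st.1) x.1
        = sj.take k ++ x.1 :: sj.drop k := by
      rw [hidx]; exact PySem.List.insert_natCast sj k x.1 hkle
    have hins2 : PySem.List.insert pf (pvBinarySearch x.1 sj st.1) x.2
        = pf.take k ++ x.2 :: pf.drop k := by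
      rw [hidx]; exact PySem.List.insert_natCast pf k x.2 hklepf
    simp only [hins1, hins2]
    have hlt : (sj.take k).length = k := by simp; omega
    have hlp : (pf.take k).length = k := by simp; omega
    refine ⟨by simp; omega, by simp; omega, ?_, ?_⟩
    · -- sortedness preserved
      rw [htake, hdrop, List.pairwise_append]
      refine ⟨hsort.sublist (List.takeWhile_sublist _), ?_, ?_⟩
      · rw [List.pairwise_cons]
        exact ⟨fun y hy => (split.1 y hy).le, hsort.sublist (List.dropWhile_sublist _)⟩
      · intro a ha b hb
        have ha' : a ≤ x.1 := by simpa using List.mem_takeWhile_imp ha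
        rcases List.mem_cons.mp hb with rfl | hb
        · exact ha'
        · exact ha'.trans (split.1 b hb).le
    · -- permutation
      have hz : (sj.take k ++ x.1 :: sj.drop k).zip (pf.take k ++ x.2 :: pf.drop k)
          = (sj.take k).zip (pf.take k) ++ (x.1, x.2) :: (sj.drop k).zip (pf.drop k) := by
        rw [List.zip_append (by omega), List.zip_cons_cons]
      rw [hz]
      have hz2 : sj.zip pf = (sj.take k).zip (pf.take k) ++ (sj.drop k).zip (pf.drop k) := by
        conv_lhs => rw [← List.take_append_drop k sj, ← List.take_append_drop k pf]
        rw [List.zip_append (by omega)]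
      have p1 : ((sj.take k).zip (pf.take k) ++ (x.1, x.2) :: (sj.drop k).zip (pf.drop k)).Perm
          (x :: (sj.zip pf)) := by
        rw [hz2]
        have pm := List.perm_middle (a := (x.1, x.2))
          (l₁ := (sj.take k).zip (pf.take k)) (l₂ := (sj.drop k).zip (pf.drop k))
        simp only [Prod.mk.eta] at pm
        exact pm
      exact p1.trans ((hperm.cons x).trans (List.perm_append_singleton x l).symm)

theorem pvGetD_set (l : List Int) (k : Nat) (v : Int) (i : Nat) (hk : k < l.length) :
    (l.set k v).getD i 0 = if i = k then v else l.getD i 0 := by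
  rw [List.getD_eq_getElem?_getD, List.getD_eq_getElem?_getD, List.getElem?_set]
  by_cases h : k = i
  · subst h
    rw [if_pos rfl, if_pos rfl, if_pos hk]
    rfl
  · rw [if_neg h, if_neg (fun hh => h hh.symm)]

theorem pvPrefixAux (pf : List Int) : ∀ (m k : Nat) (ps : List Int), ps.length = pf.length →
    k + m = pf.length →
    (∀ i, i < k → ps.getD i 0 = pvPmax pf i) →
    (∀ i, k ≤ i → i < pf.length → ps.getD i 0 = pf.getD i 0) →
    ((List.range' k m).foldl
        (fun ps idx =>
          if 0 < idx ∧ ps.getD (idx - 1) 0 > ps.getD idx 0 then ps.set idx (ps.getD (idx - 1) 0) else ps)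
        ps).length = pf.length ∧
      ∀ i, i < pf.length →
        ((List.range' k m).foldl
          (fun ps idx =>
            if 0 < idx ∧ ps.getD (idx - 1) 0 > ps.getD idx 0 then ps.set idx (ps.getD (idx - 1) 0) else ps)
          ps).getD i 0 = pvPmax pf i
  | 0, k, ps, hlen, hkm, h1, _ => by
    refine ⟨by simpa using hlen, ?_⟩
    intro i hi
    simpa using h1 i (by omega)
  | m + 1, k, ps, hlen, hkm, h1, h2 => by
    rw [List.range'_succ, List.foldl_cons]
    set ps' := (if 0 < k ∧ ps.getD (k - 1) 0 > ps.getD k 0 then ps.set k (ps.getD (k - 1) 0) else ps) with hps'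
    have hklen : k < pf.length := by omega
    have hlen' : ps'.length = pf.length := by
      rw [hps']; split_ifs <;> simp [hlen]
    have h2k : ps.getD k 0 = pf.getD k 0 := h2 k (by omega) hklen
    have h1' : ∀ i, i < k + 1 → ps'.getD i 0 = pvPmax pf i := by
      intro i hi
      rcases Nat.lt_or_ge i k with hik | hik
      · have : ps'.getD i 0 = ps.getD i 0 := by
          rw [hps']; split_ifs with hc
          · rw [pvGetD_set ps k _ i (by omega)]; simp [Nat.ne_of_lt hik]
          · rfl
        rw [this]; exact h1 i hik
      · have hik' : k = i := by omega
        subst hik'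
        cases k with
        | zero =>
          have : ps' = ps := by rw [hps']; simp
          rw [this, h2k]
          rfl
        | succ k' =>
          have hk1 : ps.getD k' 0 = pvPmax pf k' := h1 k' (by omega)
          rw [hps']
          split_ifs with hc
          · rw [pvGetD_set ps (k' + 1) _ (k' + 1) (by omega)]
            rw [if_pos rfl]
            simp only [Nat.add_sub_cancel] at hc ⊢
            rw [hk1]
            show pvPmax pf k' = pvPmax pf (k' + 1)
            rw [hk1, h2k] at hc
            have hdef : pvPmax pf (k' + 1) = max (pvPmax pf k') (pf.getD (k' + 1) 0) := rfl
            rw [hdef, max_eq_left (by omega)]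
          · simp only [Nat.add_sub_cancel] at hc
            rw [h2k]
            show pf.getD (k' + 1) 0 = pvPmax pf (k' + 1)
            rw [hk1, h2k] at hc
            have hdef : pvPmax pf (k' + 1) = max (pvPmax pf k') (pf.getD (k' + 1) 0) := rfl
            rw [hdef, max_eq_right (by omega)]
    have h2' : ∀ i, k + 1 ≤ i → i < pf.length → ps'.getD i 0 = pf.getD i 0 := by
      intro i hi hil
      have : ps'.getD i 0 = ps.getD i 0 := by
        rw [hps']; split_ifs with hc
        · rw [pvGetD_set ps k _ i (by omega), if_neg (by omega)]
        · rfl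
      rw [this]; exact h2 i (by omega) hil
    exact pvPrefixAux pf m (k + 1) ps' hlen' (by omega) h1' h2'

theorem find_max_profits_eq (difficulty profit worker : List Int) :
    find_max_profits difficulty profit worker = find_max_profits_alt difficulty profit worker := by
  unfold find_max_profits find_max_profits_alt
  obtain ⟨hlen, hll, hsort, hperm⟩ := pvInsertLoop_inv (difficulty.zip profit)
  set st := (difficulty.zip profit).foldl
    (fun (s : Int × List Int × List Int) jdp =>
      let idx := pvBinarySearch jdp.1 s.2.1 s.1
      (s.1 + 1, PySem.List.insert s.2.1 idx jdp.1, PySem.List.insert s.2.2 idx jdp.2))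
    (0, [], []) with hst
  set sj := st.2.1 with hsj
  set pf := st.2.2 with hpf
  obtain ⟨hq, hqd⟩ := pvPrefixAux pf pf.length 0 pf rfl (by omega)
    (fun i hi => absurd hi (by omega)) (fun i _ _ => rfl)
  rw [← List.range_eq_range'] at hq hqd
  set q := (List.range pf.length).foldl
    (fun ps idx =>
      if 0 < idx ∧ ps.getD (idx - 1) 0 > ps.getD idx 0 then ps.set idx (ps.getD (idx - 1) 0) else ps)
    pf with hqdef
  show worker.foldl
      (fun acc ability =>
        let idx := pvBinarySearch ability sj st.1
        if 0 < idx then acc + PySem.List.pyGetD q (idx - 1) 0 else acc)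
      0
    = worker.foldl
      (fun total ability =>
        match pvBestFor (difficulty.zip profit) ability with
        | some b => total + b
        | none => total)
      0
  apply PySem.List.foldl_congr_mem
  intro acc w _
  simp only []
  -- the insertion index for this worker
  rw [hlen, pvBinarySearch_spec w sj hsort]
  set k := sj.countP (fun a => decide (a ≤ w)) with hkdef
  have hkle : k ≤ sj.length := List.countP_le_length
  have hklepf : k ≤ pf.length := by omega
  -- identify B's value
  have split := pvSortedSplit w sj hsort
  have htake : sj.take k = sj.takeWhile (fun a => decide (a ≤ w)) := by
    conv_lhs => rw [← List.takeWhile_append_dropWhile (p := fun a => decide (a ≤ w)) (l := sj)]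
    rw [hkdef, split.2, List.take_left]
  have hdrop : sj.drop k = sj.dropWhile (fun a => decide (a ≤ w)) := by
    conv_lhs => rw [← List.takeWhile_append_dropWhile (p := fun a => decide (a ≤ w)) (l := sj)]
    rw [hkdef, split.2, List.drop_left]
  have hlt : (sj.take k).length = k := by simp; omega
  have hlp : (pf.take k).length = k := by simp; omega
  have hz2 : sj.zip pf = (sj.take k).zip (pf.take k) ++ (sj.drop k).zip (pf.drop k) := by
    conv_lhs => rw [← List.take_append_drop k sj, ← List.take_append_drop k pf]
    rw [List.zip_append (by omega)]
  have hfilter : (sj.zip pf).filter (fun p => decide (p.1 ≤ w)) = (sj.take k).zip (pf.take k) := by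
    rw [hz2, List.filter_append]
    have h1 : ((sj.take k).zip (pf.take k)).filter (fun p => decide (p.1 ≤ w))
        = (sj.take k).zip (pf.take k) := by
      rw [List.filter_eq_self]
      intro a ha
      have := (List.of_mem_zip (by exact ha)).1
      rw [htake] at this
      simpa using List.mem_takeWhile_imp this
    have h2 : ((sj.drop k).zip (pf.drop k)).filter (fun p => decide (p.1 ≤ w)) = [] := by
      rw [List.filter_eq_nil_iff]
      intro a ha
      have := (List.of_mem_zip (by exact ha)).1
      rw [hdrop] at this
      have := split.1 _ this
      simp; omega
    rw [h1, h2, List.append_nil]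
  have hB : pvBestFor (difficulty.zip profit) w = pvOmax (pf.take k) := by
    rw [pvBestFor_eq]
    have hp : ((difficulty.zip profit).filter (fun p => decide (p.1 ≤ w))).Perm
        ((sj.zip pf).filter (fun p => decide (p.1 ≤ w))) :=
      (List.Perm.filter _ hperm).symm
    rw [pvOmax_perm (hp.map Prod.snd), hfilter, List.map_snd_zip (by omega)]
  cases Nat.eq_zero_or_pos k with
  | inl hk0 =>
    rw [hB, hk0]
    simp [pvOmax]
  | inr hkpos =>
    rw [hB, pvOmax_take pf k hkpos hklepf]
    rw [if_pos (by omega : (0 : Int) < (k : Int))]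
    have hcast : ((k : Int) - 1) = ((k - 1 : Nat) : Int) := by omega
    rw [hcast, PySem.List.pyGetD_natCast, hqd (k - 1) (by omega)]

-- ===== VERDICT (by name: the statement is the Claim_ definition above) =====
theorem find_max_profits_spec : Claim_equal_find_max_profits := by
  intro difficulty profit worker _
  exact find_max_profits_eq difficulty profit worker
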